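-- pv_equiv track=rewrite | github.com/adminatgithub/MLP-from-scratch | functions.py | batch_decode
-- ===== SOURCE A (Python) =====
-- def batch_decode(vectors):
--   indexes = []
--   for vec in vectors:
--     index = None
--     h = 0
--     for i,v in enumerate(vec):
--       if h<v:
--         h = v
--         index = i
--     indexes.append(index)
--   return indexes
-- ===== SOURCE B (Python) =====
-- def batch_decode(vectors):
--     out = []
--     for vec in vectors:
--         if vec:
--             m = max(vec)
--             out.append(vec.index(m) if m > 0 else None)
--         else:
--             out.append(None)
--     return out
-- ===== Notes on version B (the rewrite author's own statement) =====
-- stated objective: simpler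
-- what changed: Replaces A's single running-max scan carrying (h, index) state with two built-in passes per vector: max(vec) then vec.index(max), with explicit empty/nonpositive guards.
import Mathlib
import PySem

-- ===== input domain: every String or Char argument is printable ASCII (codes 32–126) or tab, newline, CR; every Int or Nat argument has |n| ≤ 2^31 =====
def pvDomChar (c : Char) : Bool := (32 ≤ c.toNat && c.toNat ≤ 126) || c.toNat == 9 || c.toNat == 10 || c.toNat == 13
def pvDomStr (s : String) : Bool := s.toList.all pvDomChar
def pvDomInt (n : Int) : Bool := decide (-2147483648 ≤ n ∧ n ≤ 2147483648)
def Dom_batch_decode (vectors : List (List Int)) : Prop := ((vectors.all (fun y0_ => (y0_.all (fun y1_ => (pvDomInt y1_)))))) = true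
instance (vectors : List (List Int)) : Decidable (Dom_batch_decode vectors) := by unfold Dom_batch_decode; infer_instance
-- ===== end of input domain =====

-- B replaces A's single running-max pass carrying (h, index) state with two built-in
-- passes per vector (max, then first index of the max), guarding empty vectors; same cost.

-- ===== PORT A =====
-- the body of A's inner 'for i,v in enumerate(vec)' loop
def decodeStep (st : Option Int × Int) (iv : Int × Int) : Option Int × Int :=
  if st.2 < iv.2 then (some iv.1, iv.2) else st

def batch_decode (vectors : List (List Int)) : List (Option Int) :=
  vectors.foldl (fun indexes vec =>
    indexes ++ [((PySem.List.enumerate vec).foldl decodeStep (none, 0)).1]) []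

-- ===== PORT B =====
-- B's per-vector body: max(vec) then vec.index(m) if m > 0, else None
def argmaxB (vec : List Int) : Option Int :=
  match PySem.List.max? vec (fun y => y) with
  | none => none
  | some m => if m > 0 then (PySem.List.index? vec m).map (fun k => (k : Int)) else none

def batch_decode_alt (vectors : List (List Int)) : List (Option Int) :=
  vectors.map argmaxB

-- ===== PRECONDITION & SPEC =====
def Spec_batch_decode (vectors : List (List Int)) (out : List (Option Int)) : Prop := out = batch_decode_alt vectors
instance (vectors : List (List Int)) (out : List (Option Int)) : Decidable (Spec_batch_decode vectors out) := by unfold Spec_batch_decode; infer_instance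

-- ===== CLAIM (what is proved, stated in full; the proofs are below) =====
def Claim_equal_batch_decode : Prop := ∀ (vectors : List (List Int)), Dom_batch_decode vectors → Spec_batch_decode vectors (batch_decode vectors)

-- ===== LEMMAS AND PROOFS =====

lemma foldl_max_init (t : List Int) (a b : Int) :
    t.foldl max (max a b) = max a (t.foldl max b) := by
  induction t generalizing b with
  | nil => simp
  | cons y t ih => simp [List.foldl, max_assoc, ih]

-- characterisation of A's inner loop for arbitrary start index and state
lemma loop_eq (vec : List Int) (s : Int) (st : Option Int × Int) :
    (PySem.List.enumerate vec s).foldl decodeStep st =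
      match PySem.List.max? vec (fun y => y) with
      | none => st
      | some m => if st.2 < m then ((PySem.List.index? vec m).map (fun k => s + (k : Int)), m) else st := by
  induction vec generalizing s st with
  | nil => simp [PySem.List.enumerate_nil, PySem.List.max?]
  | cons x t ih =>
    rw [PySem.List.enumerate_cons, List.foldl_cons, ih]
    cases t with
    | nil =>
      have h0 : PySem.List.max? ([] : List Int) (fun y => y) = none := by
        simp [PySem.List.max?]
      have h1 : PySem.List.max? [x] (fun y => y) = some x := by
        simpa using PySem.List.max?_id_cons x []
      rw [h0, h1]
      by_cases hx : st.2 < x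
      · simp [decodeStep, hx]
      · simp [decodeStep, hx]
    | cons y t' =>
      have hmt : PySem.List.max? (y :: t') (fun y => y) = some (t'.foldl max y) :=
        PySem.List.max?_id_cons y t'
      have hm : PySem.List.max? (x :: y :: t') (fun y => y) = some (max x (t'.foldl max y)) := by
        rw [PySem.List.max?_id_cons]
        simp [List.foldl, foldl_max_init]
      set mt := t'.foldl max y with hmtdef
      rw [hmt, hm]
      by_cases hx : st.2 < x
      · simp only [decodeStep, hx, if_pos]
        by_cases hxmt : x < mt
        · have h1 : max x mt = mt := max_eq_right hxmt.le
          have hne : x ≠ mt := ne_of_lt hxmt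
          rw [if_pos hxmt, h1, if_pos (lt_trans hx hxmt),
              PySem.List.index?_cons_of_ne (v := mt) (xs := y :: t') hne]
          cases PySem.List.index? (y :: t') mt
          · simp
          · simp; omega
        · have h1 : max x mt = x := max_eq_left (not_lt.mp hxmt)
          rw [if_neg hxmt, h1, if_pos hx, PySem.List.index?_cons_self]
          simp
      · simp only [decodeStep, hx, ite_false]
        by_cases hmt2 : st.2 < mt
        · have hxmt : x < mt := lt_of_le_of_lt (not_lt.mp hx) hmt2
          have h1 : max x mt = mt := max_eq_right hxmt.le
          have hne : x ≠ mt := ne_of_lt hxmt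
          rw [if_pos hmt2, h1, if_pos hmt2,
              PySem.List.index?_cons_of_ne (v := mt) (xs := y :: t') hne]
          cases PySem.List.index? (y :: t') mt
          · simp
          · simp; omega
        · have h1 : ¬ st.2 < max x mt := by
            rcases max_cases x mt with ⟨h, _⟩ | ⟨h, _⟩ <;> rw [h]
            · exact hx
            · exact hmt2
          rw [if_neg hmt2, if_neg h1]

lemma vec_eq (vec : List Int) :
    ((PySem.List.enumerate vec).foldl decodeStep (none, 0)).1 = argmaxB vec := by
  have h := loop_eq vec 0 (none, 0)
  unfold PySem.List.enumerate at h ⊢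
  rw [h]
  unfold argmaxB
  cases hmax : PySem.List.max? vec (fun y => y) with
  | none => rfl
  | some m =>
    by_cases hm : (0 : Int) < m
    · simp [hm]
    · simp [hm]

lemma foldl_snoc (g : List Int → Option Int) (vectors : List (List Int)) (acc : List (Option Int)) :
    vectors.foldl (fun indexes vec => indexes ++ [g vec]) acc = acc ++ vectors.map g := by
  induction vectors generalizing acc with
  | nil => simp
  | cons v t ih => simp [List.foldl, ih]

-- ===== VERDICT (by name: the statement is the Claim_ definition above) =====
theorem batch_decode_spec : Claim_equal_batch_decode := by
  intro vectors _
  unfold Spec_batch_decode batch_decode batch_decode_alt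
  have h : ∀ vec : List Int,
      ((PySem.List.enumerate vec).foldl decodeStep (none, 0)).1 = argmaxB vec := vec_eq
  calc vectors.foldl (fun indexes vec =>
          indexes ++ [((PySem.List.enumerate vec).foldl decodeStep (none, 0)).1]) []
      = [] ++ vectors.map (fun vec => ((PySem.List.enumerate vec).foldl decodeStep (none, 0)).1) :=
        foldl_snoc _ vectors []
    _ = vectors.map argmaxB := by simp [h]
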